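-- pv_equiv track=rewrite | github.com/MrBrantCode/unitest_baseline | mut_generate/mist_train_cf/cf_80133/solution.py | find_unpaired
-- ===== SOURCE A (Python) =====
-- def find_unpaired(arr):
--     res = []
--     for i, subarr in enumerate(arr):
--         counts = {}
--         for num in subarr:
--             if num in counts:
--                 counts[num] += 1
--             else:
--                 counts[num] = 1
--         for num, count in counts.items():
--             if count % 2 != 0:
--                 res.append((i, num))
--                 break
--     return res
-- ===== SOURCE B (Python) =====
-- def _first_odd(sub):
--     return next((v for v in sub if sub.count(v) % 2 == 1), None)
--
-- def find_unpaired(arr):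
--     return [(i, x) for i, sub in enumerate(arr) if (x := _first_odd(sub)) is not None]
-- ===== Notes on version B (the rewrite author's own statement) =====
-- stated objective: simpler
-- what changed: B drops A's count dictionary entirely: for each subarray it scans in order for the first element whose count in the subarray is odd (the first such index is necessarily that value's first occurrence, matching A's dict insertion-order tie-break), built as a comprehension with a next(...) helper.
import Mathlib
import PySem

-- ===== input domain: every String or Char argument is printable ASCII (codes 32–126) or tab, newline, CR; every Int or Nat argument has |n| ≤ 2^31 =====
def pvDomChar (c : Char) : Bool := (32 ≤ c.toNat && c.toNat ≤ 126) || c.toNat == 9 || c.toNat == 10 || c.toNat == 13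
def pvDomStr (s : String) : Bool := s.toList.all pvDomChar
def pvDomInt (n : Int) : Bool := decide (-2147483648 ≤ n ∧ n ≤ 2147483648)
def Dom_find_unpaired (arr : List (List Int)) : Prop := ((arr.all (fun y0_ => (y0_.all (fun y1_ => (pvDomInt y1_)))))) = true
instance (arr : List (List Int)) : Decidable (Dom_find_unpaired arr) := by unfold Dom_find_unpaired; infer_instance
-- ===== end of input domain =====

-- B drops A's count dict: per subarray it scans for the first element with an odd count in the subarray (simpler; quadratic per subarray vs A's linear).

-- ===== PORT A =====
-- `counts[num] += 1` / `counts[num] = 1` on a dict, kept as the two-branch insert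
def aCount (d : PySem.Dict Int Int) (num : Int) : PySem.Dict Int Int :=
  if d.contains num then d.insert num (d.getD num 0 + 1) else d.insert num 1

def find_unpaired (arr : List (List Int)) : List (Int × Int) :=
  (PySem.List.enumerate arr).foldl (fun res p =>
    let counts := p.2.foldl aCount PySem.Dict.empty
    -- `for num, count in counts.items(): if count % 2 != 0: res.append((i, num)); break`
    match counts.items.find? (fun kv => PySem.Int.mod kv.2 2 != 0) with
    | some kv => res ++ [(p.1, kv.1)]
    | none => res) []

-- ===== PORT B =====
-- `next((v for v in sub if sub.count(v) % 2 == 1), None)`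
def firstOdd (sub : List Int) : Option Int :=
  sub.find? (fun v => sub.count v % 2 == 1)

-- the comprehension `[(i, x) for i, sub in enumerate(arr) if (x := _first_odd(sub)) is not None]`
def find_unpaired_alt (arr : List (List Int)) : List (Int × Int) :=
  (PySem.List.enumerate arr).filterMap (fun p => (firstOdd p.2).map (fun x => (p.1, x)))

-- ===== PRECONDITION & SPEC =====
def Spec_find_unpaired (arr : List (List Int)) (out : List (Int × Int)) : Prop := out = find_unpaired_alt arr
instance (arr : List (List Int)) (out : List (Int × Int)) : Decidable (Spec_find_unpaired arr out) := by unfold Spec_find_unpaired; infer_instance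

-- ===== CLAIM (what is proved, stated in full; the proofs are below) =====
def Claim_equal_find_unpaired : Prop := ∀ (arr : List (List Int)), Dom_find_unpaired arr → Spec_find_unpaired arr (find_unpaired arr)

-- ===== LEMMAS AND PROOFS =====

-- A's two-branch dict update is the counter update.
theorem aCount_eq : aCount = fun d x => d.insert x (d.getD x 0 + 1) := by
  funext d x
  unfold aCount
  by_cases h : d.contains x = true
  · simp [h]
  · rw [PySem.Dict.getD_of_not_contains d 0 (by simpa using h)]
    simp [h]

-- find? commutes with Python-set dedup (first occurrences, in order).
theorem find?_foldl_add (p : Int → Bool) (l : List Int) (s : PySem.Set Int) :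
    List.find? p (l.foldl PySem.Set.add s) = (List.find? p s).or (List.find? p l) := by
  induction l generalizing s with
  | nil => simp
  | cons x t ih =>
    simp only [List.foldl_cons, ih]
    by_cases h : PySem.Set.contains s x = true
    · simp only [PySem.Set.add, h, if_pos]
      cases hs : List.find? p s with
      | some v => simp
      | none =>
        have hpx : p x = false := by
          have := List.find?_eq_none.mp hs x
            (by simpa [PySem.Set.contains, List.contains_iff_mem] using h)
          simpa using this
        simp [hpx]
    · have h' : PySem.Set.contains s x = false := by simpa using h
      simp only [PySem.Set.add, h', Bool.false_eq_true, if_false]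
      rw [List.find?_append]
      cases hs : List.find? p s with
      | some v => simp
      | none =>
        simp only [Option.or, List.find?_cons]
        cases hpx : p x <;> simp

theorem find?_ofList (p : Int → Bool) (l : List Int) :
    List.find? p (PySem.Set.ofList l) = List.find? p l := by
  have := find?_foldl_add p l PySem.Set.empty
  simpa [PySem.Set.ofList_eq_foldl, PySem.Set.empty] using this

-- A's per-subarray pick (first dict key with odd count) is B's firstOdd.
theorem pick_eq (l : List Int) :
    ((l.foldl aCount PySem.Dict.empty).items.find? (fun kv => PySem.Int.mod kv.2 2 != 0)).map (fun x => x.1)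
      = firstOdd l := by
  rw [aCount_eq, PySem.Dict.foldl_insert_getD_add_one_eq_counter, PySem.Dict.items_counter]
  rw [List.find?_map, Option.map_map]
  have hpred : ((fun kv : Int × Int => PySem.Int.mod kv.2 2 != 0) ∘ fun k => (k, (l.count k : Int)))
      = fun v => l.count v % 2 == 1 := by
    funext k
    simp only [Function.comp_apply, bne]
    rw [PySem.Int.mod_eq_emod_of_pos (by norm_num : (0:Int) < 2)]
    by_cases hcnt : List.count k l % 2 = 1
    · have hm : ((List.count k l : Int)) % 2 = 1 := by omega
      simp [hm, hcnt]
    · have hm : ((List.count k l : Int)) % 2 = 0 := by omega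
      have : (List.count k l % 2 == 1) = false := by simpa using hcnt
      simp [hm, this]
  rw [hpred, find?_ofList]
  have hid : ((fun x : Int × Int => x.1) ∘ fun k : Int => (k, (l.count k : Int))) = id := by
    funext k; rfl
  rw [hid, Option.map_id]
  rfl

-- A's append-on-match fold is filterMap of the picked pair.
theorem foldl_pick_eq_filterMap (f : List Int → Option (Int × Int))
    (l : List (Int × List Int)) (init : List (Int × Int)) :
    l.foldl (fun res p => match f p.2 with | some kv => res ++ [(p.1, kv.1)] | none => res) init
      = init ++ l.filterMap (fun p => (f p.2).map (fun kv => (p.1, kv.1))) := by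
  induction l generalizing init with
  | nil => simp
  | cons x t ih =>
    simp only [List.foldl_cons, List.filterMap_cons]
    cases h : f x.2 with
    | none => simpa using ih init
    | some kv => simpa using ih (init ++ [(x.1, kv.1)])

-- ===== VERDICT (by name: the statement is the Claim_ definition above) =====
theorem find_unpaired_spec : Claim_equal_find_unpaired := by
  intro arr _
  unfold Spec_find_unpaired find_unpaired find_unpaired_alt
  show (PySem.List.enumerate arr).foldl (fun res p =>
      match (p.2.foldl aCount PySem.Dict.empty).items.find? (fun kv => PySem.Int.mod kv.2 2 != 0) with
      | some kv => res ++ [(p.1, kv.1)] | none => res) []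
    = (PySem.List.enumerate arr).filterMap (fun p => (firstOdd p.2).map (fun x => (p.1, x)))
  rw [foldl_pick_eq_filterMap (fun sub =>
        (sub.foldl aCount PySem.Dict.empty).items.find? (fun kv => PySem.Int.mod kv.2 2 != 0))]
  simp only [List.nil_append]
  apply List.filterMap_congr
  intro p _
  rw [← pick_eq p.2, Option.map_map]
  rfl
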